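-- pv_equiv track=rewrite | github.com/KAFINDO02/TextIndexerPy | retrieval.py | highlight_all_terms
-- ===== SOURCE A (Python) =====
-- from typing import Dict, List, Tuple
--
-- def highlight_all_terms(snippet: str, terms: List[str]) -> str:
--     """
--     Met en évidence toutes les occurrences des termes donnés dans l'extrait.
--     Gère à la fois les termes simples et les expressions multi-mots.
--
--     Args :
--         snippet : L'extrait de texte
--         terms : Liste des termes à mettre en évidence
--
--     Returns :
--         Extrait avec tous les termes surlignés
--     """
--     tokens = snippet.split()
--
--     # D'abord, gérer les expressions multi-mots
--     i = 0
--     while i < len(tokens):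
--         for term in terms:
--             term_words = term.lower().split()
--             if len(term_words) <= 1:
--                 continue
--             if i + len(term_words) > len(tokens):
--                 continue
--             match = True
--             for j, term_word in enumerate(term_words):
--                 clean_token = ''.join(c for c in tokens[i+j] if c.isalnum()).lower()
--                 if clean_token != term_word:
--                     match = False
--                     break
--             if match:
--                 original_phrase = ' '.join(tokens[i:i+len(term_words)])
--                 tokens[i] = f"**{original_phrase}**"
--                 for _ in range(len(term_words) - 1):
--                     tokens.pop(i + 1)
--                 break
--         i += 1
--
--     # Ensuite, gérer les termes simples
--     for i, token in enumerate(tokens):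
--         if token.startswith('**') and token.endswith('**'):
--             continue
--         clean_token = ''.join(c for c in token if c.isalnum()).lower()
--         for term in terms:
--             if ' ' not in term and clean_token == term.lower():
--                 tokens[i] = f"**{token}**"
--                 break
--
--     return ' '.join(tokens)
-- ===== SOURCE B (Python) =====
-- def highlight_all_terms(snippet, terms):
--     tokens = snippet.split()
--     cleaned = [''.join(c for c in t if c.isalnum()).lower() for t in tokens]
--     singles = {t.lower() for t in terms if ' ' not in t}
--     phrases = {}
--     for t in terms:
--         ws = t.lower().split()
--         if len(ws) >= 2:
--             phrases.setdefault(ws[0], []).append(ws)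
--     out = []
--     i = 0
--     n = len(tokens)
--     while i < n:
--         hit = None
--         for ws in phrases.get(cleaned[i], ()):
--             k = len(ws)
--             if i + k <= n and cleaned[i:i + k] == ws:
--                 hit = k
--                 break
--         if hit is not None:
--             out.append('**' + ' '.join(tokens[i:i + hit]) + '**')
--             i += hit
--         else:
--             tok = tokens[i]
--             if not (tok.startswith('**') and tok.endswith('**')) and cleaned[i] in singles:
--                 out.append('**' + tok + '**')
--             else:
--                 out.append(tok)
--             i += 1
--     return ' '.join(out)
-- ===== Notes on version B (the rewrite author's own statement) =====
-- stated objective: alternative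
-- what changed: A rescans and re-splits every term at every token position and merges matched phrases into the token list in place before a second full highlighting pass; B pre-cleans all tokens once, builds a set of single terms and a first-word-indexed dict of phrase word lists, and emits the result in one greedy forward pass.
import Mathlib
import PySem

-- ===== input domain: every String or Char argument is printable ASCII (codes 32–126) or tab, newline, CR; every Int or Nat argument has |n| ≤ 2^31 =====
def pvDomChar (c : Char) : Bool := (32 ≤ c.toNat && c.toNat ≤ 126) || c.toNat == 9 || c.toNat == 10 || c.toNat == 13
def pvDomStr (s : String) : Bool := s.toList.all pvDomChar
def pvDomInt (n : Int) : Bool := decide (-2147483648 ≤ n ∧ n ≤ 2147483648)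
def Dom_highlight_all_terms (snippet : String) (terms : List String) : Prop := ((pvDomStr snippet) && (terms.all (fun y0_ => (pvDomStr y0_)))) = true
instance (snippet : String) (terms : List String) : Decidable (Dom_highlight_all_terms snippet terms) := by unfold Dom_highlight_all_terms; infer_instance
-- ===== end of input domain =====

-- B replaces A's rescan of every term at every position (and its in-place token merging) by one
-- precomputed cleaned-token list, a set of single terms and a first-word-indexed dict of phrase
-- term word lists, emitting the output in a single forward pass; objective: alternative.

-- ===== PORT A =====

-- ''.join(c for c in t if c.isalnum()).lower()
def pvCleanA (t : String) : String := String.ofList (PySem.Chars.lower (t.toList.filter PySem.Chars.isalnum))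

-- the inner 'for j, term_word in enumerate(term_words)' match loop; tokens[i+j] is in range
-- whenever the caller has checked i + len(term_words) <= len(tokens), so getD's default is unreachable
def pvMatchA (tokens : List String) (i : Nat) (ws : List String) : Bool :=
  (List.range ws.length).all (fun j => pvCleanA (tokens.getD (i + j) "") == ws.getD j "")

-- the 'for term in terms' loop of pass 1: first multi-word term matching at position i
-- (A only ever uses term_words through its length and the slice it selects, so we return it whole)
def pvFindPhraseA (tokens : List String) (i : Nat) : List String → Option (List String)
  | [] => none
  | t :: rest =>
    let ws := PySem.Str.split₀ (PySem.Str.lower t)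
    if ws.length ≤ 1 then pvFindPhraseA tokens i rest
    else if tokens.length < i + ws.length then pvFindPhraseA tokens i rest
    else if pvMatchA tokens i ws then some ws
    else pvFindPhraseA tokens i rest

-- needed by pvLoopA's termination: a found phrase has ≥ 2 words and fits in the token list
theorem pvFindPhraseA_some {tokens : List String} {i : Nat} {ts : List String} {ws : List String}
    (h : pvFindPhraseA tokens i ts = some ws) : 2 ≤ ws.length ∧ i + ws.length ≤ tokens.length := by
  induction ts with
  | nil => simp [pvFindPhraseA] at h
  | cons t rest ih =>
    simp only [pvFindPhraseA] at h
    split_ifs at h with h1 h2 h3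
    · exact ih h
    · exact ih h
    · cases h; omega
    · exact ih h

-- A's pass-1 while loop: tokens[i] = '**…**'; pops = take i ++ [merged] ++ drop (i+k)
def pvLoopA (terms : List String) (tokens : List String) (i : Nat) : List String :=
  if h : i < tokens.length then
    match hf : pvFindPhraseA tokens i terms with
    | some ws =>
      let merged := "**" ++ PySem.Str.join " " ((tokens.drop i).take ws.length) ++ "**"
      pvLoopA terms (tokens.take i ++ [merged] ++ tokens.drop (i + ws.length)) (i + 1)
    | none => pvLoopA terms tokens (i + 1)
  else tokens
termination_by tokens.length - i
decreasing_by
  · have := pvFindPhraseA_some hf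
    simp only [List.length_append, List.length_take, List.length_drop, List.length_cons,
      List.length_nil]
    omega
  · omega

-- pass-2 inner 'for term in terms' loop (break on first single term equal to the cleaned token)
def pvSingleHitA : List String → String → Bool
  | [], _ => false
  | t :: rest, cl =>
    if !(PySem.Str.isIn " " t) && cl == PySem.Str.lower t then true else pvSingleHitA rest cl

-- pass-2 body for one token (each iteration reads and writes only tokens[i], so the loop is a map)
def pvPass2A (terms : List String) (token : String) : String :=
  if PySem.Str.startswith token "**" && PySem.Str.endswith token "**" then token
  else if pvSingleHitA terms (pvCleanA token) then "**" ++ token ++ "**"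
  else token

def highlight_all_terms (snippet : String) (terms : List String) : String :=
  let tokens := PySem.Str.split₀ snippet
  PySem.Str.join " " ((pvLoopA terms tokens 0).map (pvPass2A terms))

-- ===== PORT B =====

-- B's cleaned-token helper (same cleaning expression as A's)
def pvCleanB (t : String) : String := String.ofList (PySem.Chars.lower (t.toList.filter PySem.Chars.isalnum))

-- {t.lower() for t in terms if ' ' not in t}
def pvSinglesB (terms : List String) : PySem.Set String :=
  PySem.Set.ofList ((terms.filter (fun t => !(PySem.Str.isIn " " t))).map PySem.Str.lower)

-- phrases.setdefault(ws[0], []).append(ws) for multi-word ws, in terms order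
def pvPhrasesB (terms : List String) : PySem.Dict String (List (List String)) :=
  terms.foldl (fun d t =>
    let ws := PySem.Str.split₀ (PySem.Str.lower t)
    if 2 ≤ ws.length then d.modify (ws.headD "") [] (fun l => l ++ [ws]) else d)
    PySem.Dict.empty

-- 'for ws in phrases.get(cleaned[i], ())': first bucket entry that fits and matches the
-- cleaned slice; cs is cleaned[i:], so 'i + k <= n' is 'k <= len(cs)' and cleaned[i:i+k] is cs.take k
def pvFindHitB (cs : List String) : List (List String) → Option Nat
  | [] => none
  | ws :: rest =>
    if ws.length ≤ cs.length && cs.take ws.length == ws then some ws.length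
    else pvFindHitB cs rest

-- B's single forward pass; the index i of Source B is represented by the suffixes tokens[i:] / cleaned[i:]
def pvLoopB (phrases : PySem.Dict String (List (List String))) (singles : PySem.Set String) :
    List String → List String → List String
  | [], _ => []
  | tok :: rt, cs =>
    match pvFindHitB cs (phrases.getD (cs.headD "") []) with
    | some k =>
      ("**" ++ PySem.Str.join " " ((tok :: rt).take k) ++ "**") ::
        pvLoopB phrases singles (rt.drop (k - 1)) (cs.drop k)
    | none =>
      (if !(PySem.Str.startswith tok "**" && PySem.Str.endswith tok "**") && singles.contains (cs.headD "")
        then "**" ++ tok ++ "**" else tok) :: pvLoopB phrases singles rt (cs.drop 1)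
termination_by toks _ => toks.length
decreasing_by
  · simp only [List.length_drop, List.length_cons]; omega
  · simp only [List.length_cons]; omega

def highlight_all_terms_alt (snippet : String) (terms : List String) : String :=
  let tokens := PySem.Str.split₀ snippet
  PySem.Str.join " " (pvLoopB (pvPhrasesB terms) (pvSinglesB terms) tokens (tokens.map pvCleanB))

-- ===== PRECONDITION & SPEC =====
def Spec_highlight_all_terms (snippet : String) (terms : List String) (out : String) : Prop := out = highlight_all_terms_alt snippet terms
instance (snippet : String) (terms : List String) (out : String) : Decidable (Spec_highlight_all_terms snippet terms out) := by unfold Spec_highlight_all_terms; infer_instance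

-- ===== CLAIM (what is proved, stated in full; the proofs are below) =====
def Claim_equal_highlight_all_terms : Prop := ∀ (snippet : String) (terms : List String), Dom_highlight_all_terms snippet terms → Spec_highlight_all_terms snippet terms (highlight_all_terms snippet terms)

-- ===== LEMMAS AND PROOFS =====

theorem pvCleanB_eq : pvCleanB = pvCleanA := rfl

-- the bucket list of pvPhrasesB at key c, computed recursively over terms
def pvBucketOf (c : String) : List String → List (List String)
  | [] => []
  | t :: ts =>
    let ws := PySem.Str.split₀ (PySem.Str.lower t)
    (if 2 ≤ ws.length ∧ ws.headD "" = c then [ws] else []) ++ pvBucketOf c ts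

theorem pvPhrasesB_getD_aux (ts : List String) : ∀ (d : PySem.Dict String (List (List String))) (c : String),
    (ts.foldl (fun d t =>
      let ws := PySem.Str.split₀ (PySem.Str.lower t)
      if 2 ≤ ws.length then d.modify (ws.headD "") [] (fun l => l ++ [ws]) else d) d).getD c [] =
    d.getD c [] ++ pvBucketOf c ts := by
  induction ts with
  | nil => intro d c; simp [pvBucketOf]
  | cons t ts ih =>
    intro d c
    simp only [List.foldl_cons, pvBucketOf, ih]
    set ws := PySem.Str.split₀ (PySem.Str.lower t) with hws
    by_cases h2 : 2 ≤ ws.length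
    · rw [if_pos h2, PySem.Dict.getD_modify]
      by_cases hc : ws.headD "" = c
      · rw [if_pos hc.symm, if_pos ⟨h2, hc⟩, hc]
        simp
      · rw [if_neg (fun h => hc h.symm), if_neg (fun (h : _ ∧ _) => hc h.2)]
        simp
    · rw [if_neg h2, if_neg (fun h => h2 h.1)]
      simp

theorem pvPhrasesB_getD (terms : List String) (c : String) :
    (pvPhrasesB terms).getD c [] = pvBucketOf c terms := by
  rw [pvPhrasesB, pvPhrasesB_getD_aux]
  simp [PySem.Dict.getD_empty]

theorem pvSingleHitA_any (ts : List String) (cl : String) :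
    pvSingleHitA ts cl = ts.any (fun t => !(PySem.Str.isIn " " t) && cl == PySem.Str.lower t) := by
  induction ts with
  | nil => rfl
  | cons t ts ih =>
    simp only [pvSingleHitA]
    by_cases h : (!(PySem.Str.isIn " " t) && cl == PySem.Str.lower t) = true
    · rw [if_pos h, List.any_cons, h, Bool.true_or]
    · rw [if_neg h, List.any_cons, Bool.eq_false_iff.mpr h, Bool.false_or]; exact ih

theorem pvSingleHitA_eq (terms : List String) (cl : String) :
    pvSingleHitA terms cl = (pvSinglesB terms).contains cl := by
  rw [pvSingleHitA_any, Bool.eq_iff_iff]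
  simp only [List.any_eq_true, List.elem_iff, PySem.Set.mem_ofList, List.mem_map,
    List.mem_filter, Bool.and_eq_true, Bool.not_eq_true', beq_iff_eq, pvSinglesB]
  constructor
  · rintro ⟨t, ht, hsp, hl⟩
    exact List.elem_eq_true_of_mem ((PySem.Set.mem_ofList _ _).2
      (List.mem_map.2 ⟨t, List.mem_filter.2 ⟨ht, by simpa using hsp⟩, hl.symm⟩))
  · intro hc
    have hmem := (PySem.Set.mem_ofList _ _).1 (List.mem_of_elem_eq_true hc)
    obtain ⟨t, htf, hl⟩ := List.mem_map.1 hmem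
    obtain ⟨ht, hsp⟩ := List.mem_filter.1 htf
    exact ⟨t, ht, by simpa using hsp, hl.symm⟩

theorem pvMatch_take (done rest ws : List String) (h : ws.length ≤ rest.length) :
    pvMatchA (done ++ rest) done.length ws = ((rest.map pvCleanA).take ws.length == ws) := by
  rw [Bool.eq_iff_iff]
  simp only [pvMatchA, List.all_eq_true, List.mem_range, beq_iff_eq]
  constructor
  · intro hall
    apply List.ext_getElem
    · simp [h]
    · intro j h1 h2
      have hjr : j < rest.length := lt_of_lt_of_le h2 h
      have hx := hall j h2
      rw [List.getD_append_right _ _ _ _ (Nat.le_add_right _ _), Nat.add_sub_cancel_left,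
        List.getD_eq_getElem _ _ hjr, List.getD_eq_getElem _ _ h2] at hx
      simpa using hx
  · intro heq j hj
    have hjr : j < rest.length := lt_of_lt_of_le hj h
    have h3 := List.getElem_of_eq heq.symm hj
    simp only [List.getElem_take, List.getElem_map] at h3
    rw [List.getD_append_right _ _ _ _ (Nat.le_add_right _ _), Nat.add_sub_cancel_left,
      List.getD_eq_getElem _ _ hjr, List.getD_eq_getElem _ _ hj]
    exact h3.symm

theorem pvHeadD_eq_getElem0 {l : List String} (h : 0 < l.length) : l.headD "" = l[0] := by
  cases l with
  | nil => simp at h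
  | cons a t => simp

theorem pvFind_corr (done rt : List String) (tok : String) : ∀ (terms : List String),
    pvFindHitB ((tok :: rt).map pvCleanA) (pvBucketOf (pvCleanA tok) terms) =
      (pvFindPhraseA (done ++ tok :: rt) done.length terms).map List.length := by
  intro terms
  induction terms with
  | nil => simp [pvFindPhraseA, pvBucketOf, pvFindHitB]
  | cons t ts ih =>
    simp only [pvFindPhraseA, pvBucketOf]
    set rest := tok :: rt with hrest
    set ws := PySem.Str.split₀ (PySem.Str.lower t) with hws
    by_cases h1 : ws.length ≤ 1
    · rw [if_pos h1, if_neg (by omega : ¬ (2 ≤ ws.length ∧ ws.headD "" = pvCleanA tok)), List.nil_append]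
      exact ih
    · have h2 : 2 ≤ ws.length := by omega
      rw [if_neg h1]
      by_cases hfit : ws.length ≤ rest.length
      · have hnl : ¬ ((done ++ rest).length < done.length + ws.length) := by
          simp only [List.length_append]; omega
        rw [if_neg hnl]
        have hm := pvMatch_take done rest ws hfit
        by_cases hc : ws.headD "" = pvCleanA tok
        · rw [if_pos ⟨h2, hc⟩, List.singleton_append]
          simp only [pvFindHitB]
          have hlen : (ws.length ≤ (rest.map pvCleanA).length) = True := by
            simp [hfit]
          by_cases hmt : pvMatchA (done ++ rest) done.length ws = true
          · rw [if_pos hmt]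
            have : ((rest.map pvCleanA).take ws.length == ws) = true := by rw [← hm]; exact hmt
            rw [if_pos (by simp [this, hfit])]
            simp
          · have hmf : pvMatchA (done ++ rest) done.length ws = false := Bool.eq_false_iff.mpr hmt
            rw [if_neg hmt]
            have : ((rest.map pvCleanA).take ws.length == ws) = false := by rw [← hm]; exact hmf
            rw [if_neg (by simp [this])]
            exact ih
        · rw [if_neg (fun h => hc h.2), List.nil_append]
          -- match must fail: the first word would have to equal the cleaned first token
          have hmf : pvMatchA (done ++ rest) done.length ws = false := by
            rw [hm]
            apply beq_eq_false_iff_ne.mpr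
            intro he
            apply hc
            have h0 : ws.headD "" = ws[0]'(by omega) := pvHeadD_eq_getElem0 (by omega)
            have hg := (List.getElem_of_eq he.symm (by omega : 0 < ws.length))
            simp only [List.getElem_take, List.getElem_map, hrest, List.getElem_cons_zero] at hg
            rw [h0]
            exact hg
          rw [if_neg (by simp [hmf])]
          exact ih
      · have hlt : (done ++ rest).length < done.length + ws.length := by
          simp only [List.length_append]; omega
        rw [if_pos hlt]
        by_cases hc : ws.headD "" = pvCleanA tok
        · have hcond : (2 ≤ ws.length ∧ ws.headD "" = pvCleanA tok) := ⟨h2, hc⟩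
          rw [if_pos hcond, List.singleton_append]
          simp only [pvFindHitB]
          have hguard : ¬ ((ws.length ≤ (List.map pvCleanA rest).length &&
              ((List.map pvCleanA rest).take ws.length == ws)) = true) := by
            simp only [List.length_map, Bool.and_eq_true, decide_eq_true_eq]
            rintro ⟨hx, -⟩
            omega
          rw [if_neg hguard]
          exact ih
        · have hncond : ¬ (2 ≤ ws.length ∧ ws.headD "" = pvCleanA tok) := fun h => hc h.2
          rw [if_neg hncond, List.nil_append]
          exact ih

theorem pvPass2A_merged (terms : List String) (s : String) :
    pvPass2A terms ("**" ++ s ++ "**") = ("**" ++ s ++ "**") := by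
  have hsw : PySem.Str.startswith ("**" ++ s ++ "**") "**" = true := by
    simp only [PySem.Str.startswith_eq, String.toList_append, PySem.Chars.startswith_iff]
    exact ⟨s.toList ++ "**".toList, by simp⟩
  have hew : PySem.Str.endswith ("**" ++ s ++ "**") "**" = true := by
    simp only [PySem.Str.endswith_eq, String.toList_append, PySem.Chars.endswith_iff]
    exact ⟨"**".toList ++ s.toList, by simp⟩
  rw [pvPass2A, if_pos (by rw [hsw, hew]; rfl)]

-- A's pass-2 body coincides with B's inline single-term highlighting of one token
theorem pvPass2A_eq_inline (terms : List String) (tok : String) :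
    pvPass2A terms tok =
      (if !(PySem.Str.startswith tok "**" && PySem.Str.endswith tok "**") &&
          (pvSinglesB terms).contains (pvCleanA tok)
        then "**" ++ tok ++ "**" else tok) := by
  rw [pvPass2A, pvSingleHitA_eq]
  by_cases hse : (PySem.Str.startswith tok "**" && PySem.Str.endswith tok "**") = true
  · rw [if_pos hse, hse]
    simp
  · rw [if_neg hse, Bool.eq_false_iff.mpr hse]
    by_cases hc : (pvSinglesB terms).contains (pvCleanA tok) = true
    · rw [hc, if_pos (by simp)]
      simp
    · rw [Bool.eq_false_iff.mpr hc, if_neg (by simp)]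
      simp

theorem pvMain (terms : List String) : ∀ (n : Nat) (rest done : List String), rest.length ≤ n →
    (pvLoopA terms (done ++ rest) done.length).map (pvPass2A terms) =
      done.map (pvPass2A terms) ++
        pvLoopB (pvPhrasesB terms) (pvSinglesB terms) rest (rest.map pvCleanB) := by
  intro n
  induction n with
  | zero =>
    intro rest done h
    have hnil : rest = [] := List.eq_nil_of_length_eq_zero (by omega)
    subst hnil
    rw [pvLoopA, dif_neg (by simp), pvLoopB]
    simp
  | succ n ih =>
    intro rest done h
    cases rest with
    | nil =>
      rw [pvLoopA, dif_neg (by simp), pvLoopB]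
      simp
    | cons tok rt =>
      have hlt : done.length < (done ++ tok :: rt).length := by simp
      rw [pvLoopA, dif_pos hlt]
      have hcorr := pvFind_corr done rt tok terms
      have hcs : (tok :: rt).map pvCleanB = pvCleanA tok :: rt.map pvCleanA := by
        rw [pvCleanB_eq]; simp
      have hhead : (((tok :: rt).map pvCleanB).headD "") = pvCleanA tok := by
        rw [hcs]; simp
      cases hf : pvFindPhraseA (done ++ tok :: rt) done.length terms with
      | none =>
        simp only [hf]
        rw [pvLoopB, hhead, pvPhrasesB_getD]
        rw [hf] at hcorr
        simp only [Option.map_none] at hcorr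
        rw [show ((tok :: rt).map pvCleanB) = ((tok :: rt).map pvCleanA) from by rw [pvCleanB_eq],
          hcorr]
        have hrec := ih rt (done ++ [tok]) (by simp only [List.length_cons] at h; omega)
        rw [List.append_cons done tok rt, show done.length + 1 = (done ++ [tok]).length from by simp]
        rw [hrec, List.map_append]
        simp only [List.map_cons, List.map_nil, List.append_assoc, List.singleton_append,
          List.cons_append, List.nil_append]
        rw [pvPass2A_eq_inline]
        simp [pvCleanB_eq]
      | some ws =>
        simp only [hf]
        obtain ⟨h2, hfit⟩ := pvFindPhraseA_some hf
        have hfit' : ws.length ≤ (tok :: rt).length := by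
          simp only [List.length_append] at hfit; omega
        rw [pvLoopB, hhead, pvPhrasesB_getD]
        rw [hf] at hcorr
        simp only [Option.map_some] at hcorr
        rw [show ((tok :: rt).map pvCleanB) = ((tok :: rt).map pvCleanA) from by rw [pvCleanB_eq],
          hcorr]
        have hdrop : (done ++ tok :: rt).drop (done.length + ws.length) = (tok :: rt).drop ws.length := by
          rw [List.drop_append]
          simp [List.drop_of_length_le (by omega : done.length ≤ done.length + ws.length)]
        rw [hdrop, List.take_left, List.drop_left]
        have hlen1 : done.length + 1 =
            (done ++ ["**" ++ PySem.Str.join " " (List.take ws.length (tok :: rt)) ++ "**"]).length := by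
          simp
        rw [hlen1]
        have hrec := ih ((tok :: rt).drop ws.length)
          (done ++ ["**" ++ PySem.Str.join " " (List.take ws.length (tok :: rt)) ++ "**"])
          (by simp only [List.length_drop, List.length_cons] at *; omega)
        rw [hrec]
        have hd1 : List.drop ws.length (tok :: rt) = List.drop (ws.length - 1) rt := by
          rw [show ws.length = (ws.length - 1) + 1 from by omega]
          try rw [Nat.add_sub_cancel]
          rw [List.drop_succ_cons]
        simp only [List.map_append, List.map_cons, List.map_nil, pvPass2A_merged, pvCleanB_eq,
          hd1, List.map_drop]
        rw [show List.drop ws.length (pvCleanA tok :: List.map pvCleanA rt) =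
            List.drop (ws.length - 1) (List.map pvCleanA rt) from by
          rw [show ws.length = (ws.length - 1) + 1 from by omega]
          try rw [Nat.add_sub_cancel]
          rw [List.drop_succ_cons]]
        simp

-- ===== VERDICT (by name: the statement is the Claim_ definition above) =====
theorem highlight_all_terms_spec : Claim_equal_highlight_all_terms := by
  intro snippet terms _
  unfold Spec_highlight_all_terms highlight_all_terms highlight_all_terms_alt
  have h := pvMain terms (PySem.Str.split₀ snippet).length (PySem.Str.split₀ snippet) [] le_rfl
  simpa using congrArg (PySem.Str.join " ") h
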